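-- pv_equiv track=rewrite | github.com/PovlAage/AoC | 2025/03.py | subsets_max
-- ===== SOURCE A (Python) =====
-- def subsets_max(x, k):
--     if k == 0 or k > len(x):
--         yield ''
--     elif k < 0:
--         raise ValueError('k must be >= 0')
--     else:
--         max_digit = max((x[i] for i in range(len(x) - k + 1)))
--         for i in range(len(x)):
--             if x[i] == max_digit:
--                 for s in subsets_max(x[i + 1:], k - 1):
--                     yield x[i] + s
-- ===== SOURCE B (Python) =====
-- def subsets_max(x, k):
--     # iterative DFS with an explicit stack instead of recursion
--     if k < 0:
--         raise ValueError('k must be >= 0')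
--     stack = [(x, '', k)]
--     while stack:
--         rem, pre, kk = stack.pop()
--         if kk == 0 or kk > len(rem):
--             yield pre
--         else:
--             m = max(rem[:len(rem) - kk + 1])
--             for i in reversed(range(len(rem))):
--                 if rem[i] == m:
--                     stack.append((rem[i + 1:], pre + rem[i], kk - 1))
-- ===== Notes on version B (the rewrite author's own statement) =====
-- stated objective: alternative
-- what changed: The recursive generator is replaced by an iterative depth-first traversal with an explicit stack of (remaining, prefix, k) states, pushing children in reverse index order so the LIFO pop order reproduces A's yield order exactly.
-- outside the precondition, e.g. on subsets_max('12', -1): A raises ValueError, B raises ValueError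
import Mathlib
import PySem

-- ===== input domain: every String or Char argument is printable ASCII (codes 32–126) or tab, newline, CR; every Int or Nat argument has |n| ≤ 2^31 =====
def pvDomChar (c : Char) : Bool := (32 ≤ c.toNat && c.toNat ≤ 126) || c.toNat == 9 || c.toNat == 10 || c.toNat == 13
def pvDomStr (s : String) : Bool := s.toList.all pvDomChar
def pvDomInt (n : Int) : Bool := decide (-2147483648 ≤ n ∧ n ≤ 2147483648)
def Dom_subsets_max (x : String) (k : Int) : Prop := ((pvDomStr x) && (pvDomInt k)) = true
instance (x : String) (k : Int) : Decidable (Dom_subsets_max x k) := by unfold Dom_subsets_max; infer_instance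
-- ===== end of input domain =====

-- B replaces A's recursive generator by an iterative explicit-stack depth-first traversal
-- that reproduces A's exact yield order (objective: alternative decomposition, same cost).

-- ===== PORT A =====

-- max((x[i] for i in range(len(x) - k + 1))): the elements are exactly x.take (len - k + 1);
-- shared helper so both ports spell the identical Python expression identically.
def winMax (xs : List Char) (k : Int) : Char :=
  (PySem.List.max? (xs.take (xs.length + 1 - k.toNat)) (fun c => c)).getD default

-- recursive core of A on char lists; the `k < 0` branch raises ValueError in Python
-- (excluded by Pre_), the port returns [] there.
def genA (xs : List Char) (k : Int) : List (List Char) :=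
  if k = 0 ∨ k > (xs.length : Int) then [[]]
  else if k < 0 then []
  else
    (List.range xs.length).attach.flatMap (fun i =>
      if xs.getD i.1 default = winMax xs k then
        (genA (xs.drop (i.1 + 1)) (k - 1)).map (fun s => xs.getD i.1 default :: s)
      else [])
termination_by xs.length
decreasing_by
  have : i.1 < xs.length := List.mem_range.mp i.2
  simp [List.length_drop]; omega

def subsets_max (x : String) (k : Int) : List String :=
  (genA x.toList k).map String.ofList

-- ===== PORT B =====

-- the children pushed for one expanded state, in ascending i order: B pushes them in
-- reversed(range(len(rem))) order, so the LIFO stack pops them in ascending order;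
-- the stack is modelled with its top at the head.
def childrenB (rem pre : List Char) (k : Int) : List (List Char × List Char × Int) :=
  (List.range rem.length).flatMap (fun i =>
    if rem.getD i default = winMax rem k then
      [(rem.drop (i + 1), pre ++ [rem.getD i default], k - 1)]
    else [])

-- termination measure for the while loop: sum of 2^len(remaining) over the stack
def stMeasure (st : List (List Char × List Char × Int)) : Nat :=
  (st.map (fun s => 2 ^ s.1.length)).sum

lemma stMeasure_append (a b : List (List Char × List Char × Int)) :
    stMeasure (a ++ b) = stMeasure a + stMeasure b := by
  simp [stMeasure]

lemma sum_range_lt_pow (n : Nat) (g : Nat → Nat) (hg : ∀ i < n, g i ≤ 2 ^ (n - 1 - i)) :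
    ((List.range n).map g).sum < 2 ^ n := by
  induction n generalizing g with
  | zero => simp
  | succ m ih =>
    rw [List.range_succ_eq_map]
    have h0 : g 0 ≤ 2 ^ m := by
      have := hg 0 (Nat.succ_pos m); simpa using this
    have htail : ((List.range m).map (fun i => g (i + 1))).sum < 2 ^ m := by
      apply ih
      intro i hi
      have := hg (i + 1) (by omega)
      have he : m - (i + 1) = m - 1 - i := by omega
      simpa [he] using this
    have hsum : ((0 :: (List.range m).map Nat.succ).map g).sum
        = g 0 + ((List.range m).map (fun i => g (i + 1))).sum := by
      simp [List.map_map, Function.comp_def]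
    rw [hsum]
    have hpow : 2 ^ (m + 1) = 2 ^ m + 2 ^ m := by ring
    omega

lemma stMeasure_children (rem pre : List Char) (k : Int) :
    stMeasure (childrenB rem pre k) < 2 ^ rem.length := by
  unfold childrenB
  have hflat : ∀ (l : List Nat) (f : Nat → List (List Char × List Char × Int)),
      stMeasure (l.flatMap f) = (l.map (fun i => stMeasure (f i))).sum := by
    intro l f
    induction l with
    | nil => simp [stMeasure]
    | cons a t ih => simp [List.flatMap_cons, stMeasure_append, ih]
  rw [hflat]
  apply sum_range_lt_pow
  intro i hi
  split
  · simp only [stMeasure, List.map_cons, List.map_nil, List.sum_cons, List.sum_nil,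
      List.length_drop, Nat.add_zero]
    have h2 : rem.length - (i + 1) = rem.length - 1 - i := by omega
    rw [h2]
  · simp [stMeasure]

-- the while loop of B: pop a state, emit or expand
def runB : List (List Char × List Char × Int) → List (List Char)
  | [] => []
  | (rem, pre, kk) :: rest =>
    if kk = 0 ∨ kk > (rem.length : Int) then pre :: runB rest
    else runB (childrenB rem pre kk ++ rest)
termination_by st => stMeasure st
decreasing_by
  · have hc : stMeasure ((rem, pre, kk) :: rest) = 2 ^ rem.length + stMeasure rest := by
      simp [stMeasure]
    have h1 : 0 < 2 ^ rem.length := Nat.two_pow_pos _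
    rw [hc]; omega
  · rw [stMeasure_append]
    have h := stMeasure_children rem pre kk
    have hc : stMeasure ((rem, pre, kk) :: rest) = 2 ^ rem.length + stMeasure rest := by
      simp [stMeasure]
    rw [hc]
    omega

-- k < 0 raises ValueError in B's Python too (excluded by Pre_); port returns [].
def subsets_max_alt (x : String) (k : Int) : List String :=
  if k < 0 then [] else (runB [(x.toList, [], k)]).map String.ofList

-- ===== PRECONDITION & SPEC =====
-- Pre_ excludes exactly k < 0, where both Pythons raise ValueError.
def Pre_subsets_max (_x : String) (k : Int) : Prop := 0 ≤ k
instance (x : String) (k : Int) : Decidable (Pre_subsets_max x k) := by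
  unfold Pre_subsets_max; infer_instance

def pvWitness_subsets_max : String × Int := ("212", 2)

def Spec_subsets_max (x : String) (k : Int) (out : List String) : Prop := out = subsets_max_alt x k
instance (x : String) (k : Int) (out : List String) : Decidable (Spec_subsets_max x k out) := by
  unfold Spec_subsets_max; infer_instance

-- ===== CLAIM (what is proved, stated in full; the proofs are below) =====
def Claim_equal_subsets_max : Prop :=
  ∀ (x : String) (k : Int), Dom_subsets_max x k → Pre_subsets_max x k →
    Spec_subsets_max x k (subsets_max x k)

-- ===== LEMMAS AND PROOFS =====

lemma flatMap_attach_eq {a b : Type} (l : List a) (f : a → List b) :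
    l.attach.flatMap (fun i => f i.1) = l.flatMap f := by
  simp [List.flatMap_def]

-- expanding one run of the stack over a block of states, given the per-state result (IH)
lemma runB_block (N : Nat)
    (IH : ∀ (r : List Char), r.length < N → ∀ (p : List Char) (kk : Int)
      (rest : List (List Char × List Char × Int)), 0 ≤ kk →
      runB ((r, p, kk) :: rest) = (genA r kk).map (fun t => p ++ t) ++ runB rest) :
    ∀ (L rest : List (List Char × List Char × Int)),
      (∀ s ∈ L, s.1.length < N ∧ 0 ≤ s.2.2) →
      runB (L ++ rest) =
        L.flatMap (fun s => (genA s.1 s.2.2).map (fun t => s.2.1 ++ t)) ++ runB rest := by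
  intro L
  induction L with
  | nil => intro rest _; simp
  | cons s t ih =>
    intro rest h
    obtain ⟨r, p, kk⟩ := s
    have hs := h (r, p, kk) (List.mem_cons_self ..)
    rw [List.cons_append, IH r hs.1 p kk (t ++ rest) hs.2,
        ih rest (fun s hs' => h s (List.mem_cons_of_mem _ hs'))]
    simp [List.flatMap_cons]

lemma run_cons (rem : List Char) :
    ∀ (pre : List Char) (kk : Int) (rest : List (List Char × List Char × Int)), 0 ≤ kk →
      runB ((rem, pre, kk) :: rest) = (genA rem kk).map (fun t => pre ++ t) ++ runB rest := by
  induction hN : rem.length using Nat.strong_induction_on generalizing rem with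
  | _ N IH =>
  intro pre kk rest hkk
  by_cases hc : kk = 0 ∨ kk > (rem.length : Int)
  · rw [runB, if_pos hc, genA, if_pos hc]
    simp
  · have hk1 : 1 ≤ kk := by
      rcases lt_trichotomy kk 0 with h | h | h
      · omega
      · exact absurd (Or.inl h) hc
      · omega
    rw [runB, if_neg hc]
    have hmem : ∀ s ∈ childrenB rem pre kk, s.1.length < N ∧ 0 ≤ s.2.2 := by
      intro s hs
      unfold childrenB at hs
      rw [List.mem_flatMap] at hs
      obtain ⟨i, hi, hsi⟩ := hs
      have hilt : i < rem.length := List.mem_range.mp hi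
      split at hsi
      · rcases List.mem_singleton.mp hsi with rfl
        refine ⟨?_, by simp; omega⟩
        simp [List.length_drop]; omega
      · exact absurd hsi (List.not_mem_nil)
    have hIH : ∀ (r : List Char), r.length < N → ∀ (p : List Char) (kq : Int)
        (rest' : List (List Char × List Char × Int)), 0 ≤ kq →
        runB ((r, p, kq) :: rest') = (genA r kq).map (fun t => p ++ t) ++ runB rest' := by
      intro r hr p kq rest' hkq
      exact IH r.length hr r rfl p kq rest' hkq
    rw [runB_block N hIH (childrenB rem pre kk) rest hmem]
    congr 1
    -- children.flatMap ... = (genA rem kk).map (pre ++ .)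
    rw [genA, if_neg hc, if_neg (by omega : ¬ kk < 0)]
    unfold childrenB
    rw [List.flatMap_assoc, List.map_flatMap]
    refine Eq.trans ?_ (flatMap_attach_eq (List.range rem.length)
      (fun j => (if rem.getD j default = winMax rem kk then
          (genA (rem.drop (j + 1)) (kk - 1)).map (fun s => rem.getD j default :: s)
        else []).map (fun t => pre ++ t))).symm
    apply List.flatMap_congr
    intro j hj
    split
    · simp [List.map_map, Function.comp_def, List.append_assoc]
    · simp

-- ===== VERDICT (by name: the statement is the Claim_ definition above) =====
theorem subsets_max_spec : Claim_equal_subsets_max := by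
  intro x k _ hpre
  unfold Spec_subsets_max subsets_max subsets_max_alt
  rw [if_neg (by exact not_lt.mpr hpre)]
  rw [run_cons x.toList [] k [] hpre]
  simp [runB]
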